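-- pv_equiv track=rewrite | github.com/kyueran/stack-ai-rag | app/ui/answer_format.py | _parse_list_items
-- ===== SOURCE A (Python) =====
-- def _parse_list_items(text: str) -> list[str]:
--     lines = [line.strip() for line in text.split("\n")]
--     items: list[str] = []
--     current: list[str] = []
--
--     for line in lines:
--         if not line:
--             continue
--         if line.startswith("- "):
--             if current:
--                 items.append(" ".join(current).strip())
--             current = [line[2:].strip()]
--             continue
--
--         if current:
--             current.append(line)
--         else:
--             current = [line]
--
--     if current:
--         items.append(" ".join(current).strip())
--
--     return items or [text]
-- ===== SOURCE B (Python) =====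
-- def _take_run(lines):
--     """Split lines into (longest prefix of non-dash lines, remainder)."""
--     i = 0
--     while i < len(lines) and not lines[i].startswith("- "):
--         i += 1
--     return lines[:i], lines[i:]
--
--
-- def _parse_list_items(text: str) -> list[str]:
--     lines = [ln.strip() for ln in text.split("\n") if ln.strip()]
--     if not lines:
--         return [text]
--     items = []
--     lead, rest = _take_run(lines)
--     if lead:
--         items.append(" ".join(lead).strip())
--     while rest:
--         head = rest[0][2:].strip()
--         run, rest = _take_run(rest[1:])
--         items.append(" ".join([head] + run).strip())
--     return items
-- ===== Notes on version B (the rewrite author's own statement) =====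
-- stated objective: alternative
-- what changed: A threads a mutable (items, current) accumulator through one per-line loop with continue branches; B first filters the stripped non-empty lines, then decomposes them into spans (an optional leading non-dash run, then per dash line its following non-dash run) via a _take_run scan and slicing, joining each span directly.
import Mathlib
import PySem

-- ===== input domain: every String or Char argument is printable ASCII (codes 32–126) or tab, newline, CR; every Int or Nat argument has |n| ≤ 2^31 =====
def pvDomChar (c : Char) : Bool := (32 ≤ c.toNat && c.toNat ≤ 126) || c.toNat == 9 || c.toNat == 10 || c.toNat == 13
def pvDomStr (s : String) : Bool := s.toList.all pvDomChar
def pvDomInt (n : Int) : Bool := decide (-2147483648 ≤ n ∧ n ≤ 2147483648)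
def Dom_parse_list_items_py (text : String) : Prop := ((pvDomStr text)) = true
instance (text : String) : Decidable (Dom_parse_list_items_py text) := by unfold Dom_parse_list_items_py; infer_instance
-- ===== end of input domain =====

-- B replaces A's per-line (items, current) accumulator loop with a span decomposition of the
-- non-blank stripped lines (a leading non-dash run, then one run per dash line); alternative
-- structure, same values and same cost.

-- ===== PORT A =====
-- " ".join(cur).strip()  (this exact expression occurs verbatim in both Pythons)
def pvJoinStrip (cur : List String) : String := PySem.Str.strip (PySem.Str.join " " cur)

-- text.split("\n"); the separator "\n" is never empty, so split? is always some and the default is dead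
def pvSplitNL (text : String) : List String := (PySem.Str.split? text "\n").getD []

-- A's for-loop over the stripped lines, state (items, current), including the post-loop flush
def pvGoA : List String → List String → List String → List String
  | [], items, current => if current ≠ [] then items ++ [pvJoinStrip current] else items
  | line :: rest, items, current =>
    if line = "" then pvGoA rest items current
    else if PySem.Str.startswith line "- " then
      pvGoA rest (if current ≠ [] then items ++ [pvJoinStrip current] else items)
        [PySem.Str.strip (PySem.Str.slice line (some 2) none)]
    else if current ≠ [] then pvGoA rest items (current ++ [line])
    else pvGoA rest items [line]

def parse_list_items_py (text : String) : List String :=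
  let lines := (pvSplitNL text).map PySem.Str.strip
  let items := pvGoA lines [] []
  if items = [] then [text] else items

-- ===== PORT B =====
-- _take_run: longest prefix of non-dash lines, and the remainder
def pvTakeRun : List String → List String × List String
  | [] => ([], [])
  | l :: ls =>
    if PySem.Str.startswith l "- " then ([], l :: ls)
    else
      let p := pvTakeRun ls
      (l :: p.1, p.2)

-- termination measure for pvSegLoop (cited in its decreasing_by)
theorem pvTakeRun_snd_length_le : ∀ ls : List String, (pvTakeRun ls).2.length ≤ ls.length := by
  intro ls
  induction ls with
  | nil => simp [pvTakeRun]
  | cons l ls ih =>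
    rw [pvTakeRun]
    split
    · simp
    · simpa using Nat.le_succ_of_le ih

-- B's while loop: each round consumes one dash line and its following non-dash run
def pvSegLoop : List String → List String → List String
  | [], items => items
  | r :: rs, items =>
    pvSegLoop (pvTakeRun rs).2
      (items ++ [pvJoinStrip (PySem.Str.strip (PySem.Str.slice r (some 2) none) :: (pvTakeRun rs).1)])
termination_by ls _ => ls.length
decreasing_by exact Nat.lt_succ_of_le (pvTakeRun_snd_length_le rs)

def parse_list_items_py_alt (text : String) : List String :=
  let lines := ((pvSplitNL text).filter (fun ln => PySem.Str.strip ln ≠ "")).map PySem.Str.strip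
  if lines = [] then [text]
  else
    let lead := (pvTakeRun lines).1
    let rest := (pvTakeRun lines).2
    pvSegLoop rest (if lead ≠ [] then [pvJoinStrip lead] else [])

-- ===== PRECONDITION & SPEC =====
def Spec_parse_list_items_py (text : String) (out : List String) : Prop := out = parse_list_items_py_alt text
instance (text : String) (out : List String) : Decidable (Spec_parse_list_items_py text out) := by unfold Spec_parse_list_items_py; infer_instance

-- ===== CLAIM (what is proved, stated in full; the proofs are below) =====
def Claim_equal_parse_list_items_py : Prop := ∀ (text : String), Dom_parse_list_items_py text → Spec_parse_list_items_py text (parse_list_items_py text)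

-- ===== LEMMAS AND PROOFS =====

-- B's line comprehension equals A's stripped lines with the blanks filtered out
theorem pv_lines_eq (xs : List String) :
    (xs.filter (fun ln => PySem.Str.strip ln ≠ "")).map PySem.Str.strip
      = (xs.map PySem.Str.strip).filter (fun ln => ln ≠ "") := by
  induction xs with
  | nil => rfl
  | cons x xs ih =>
    by_cases h : PySem.Str.strip x = "" <;>
      simp [h] <;> simpa [ne_eq, decide_not] using ih

-- A's loop skips blank lines: folding over lines = folding over the non-blank lines
theorem pvGoA_filter (ls : List String) : ∀ items cur,
    pvGoA ls items cur = pvGoA (ls.filter (fun ln => ln ≠ "")) items cur := by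
  induction ls with
  | nil => intro items cur; rfl
  | cons l ls ih =>
    intro items cur
    by_cases h : l = ""
    · simp [pvGoA, h, ih]
    · rw [List.filter_cons, if_pos (by simp [h])]
      simp only [pvGoA, if_neg h]
      split
      · exact ih _ _
      · split <;> exact ih _ _

-- already-collected items pass through the rest of A's loop unchanged
theorem pvGoA_acc (ls : List String) : ∀ items cur,
    pvGoA ls items cur = items ++ pvGoA ls [] cur := by
  induction ls with
  | nil =>
    intro items cur
    by_cases h : cur = [] <;> simp [pvGoA, h]
  | cons l ls ih =>
    intro items cur
    by_cases h0 : l = ""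
    · simp only [pvGoA, if_pos h0]; exact ih items cur
    · simp only [pvGoA, if_neg h0]
      by_cases hd : PySem.Str.startswith l "- " = true
      · simp only [if_pos hd]
        by_cases hc : cur = []
        · subst hc
          rw [if_neg (by simp), if_neg (by simp)]
          exact ih _ _
        · rw [if_pos hc, if_pos hc]
          rw [ih (items ++ [pvJoinStrip cur]), ih ([] ++ [pvJoinStrip cur])]
          simp
      · simp only [if_neg hd]
        by_cases hc : cur = []
        · subst hc
          rw [if_neg (by simp), if_neg (by simp)]
          exact ih _ _
        · rw [if_pos hc, if_pos hc]
          exact ih _ _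

-- same accumulator fact for B's while loop (induction on a length bound)
theorem pvSegLoop_acc_aux : ∀ (n : Nat) (ls : List String), ls.length ≤ n →
    ∀ (items : List String), pvSegLoop ls items = items ++ pvSegLoop ls [] := by
  intro n
  induction n with
  | zero =>
    intro ls h items
    have : ls = [] := by cases ls <;> simp_all
    subst this; simp [pvSegLoop]
  | succ n ih =>
    intro ls h items
    cases ls with
    | nil => simp [pvSegLoop]
    | cons r rs =>
      have hr : (pvTakeRun rs).2.length ≤ n :=
        le_trans (pvTakeRun_snd_length_le rs) (by simpa using h)
      rw [pvSegLoop, pvSegLoop, ih _ hr, ih _ hr ([] ++ _)]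
      simp

theorem pvSegLoop_acc (ls : List String) (items : List String) :
    pvSegLoop ls items = items ++ pvSegLoop ls [] :=
  pvSegLoop_acc_aux ls.length ls le_rfl items

-- with an open item, A absorbs the non-dash run into it, then behaves like B's loop
theorem pvGoA_open (ls : List String) (hne : ∀ l ∈ ls, l ≠ "") : ∀ cur : List String, cur ≠ [] →
    pvGoA ls [] cur
      = pvJoinStrip (cur ++ (pvTakeRun ls).1) :: pvSegLoop (pvTakeRun ls).2 [] := by
  induction ls with
  | nil => intro cur hc; simp [pvGoA, pvTakeRun, pvSegLoop, hc]
  | cons l ls ih =>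
    intro cur hc
    have h0 : ¬ l = "" := hne l (by simp)
    have hne' : ∀ x ∈ ls, x ≠ "" := fun x hx => hne x (by simp [hx])
    by_cases hd : PySem.Str.startswith l "- " = true
    · simp only [pvGoA, if_neg h0, if_pos hd, if_pos hc]
      rw [pvGoA_acc, ih hne' _ (by simp)]
      rw [pvTakeRun, if_pos hd]
      rw [pvSegLoop]
      conv_rhs => rw [pvSegLoop_acc]
      simp
    · simp only [pvGoA, if_neg h0, if_neg hd, if_pos hc]
      rw [ih hne' _ (by simp)]
      rw [pvTakeRun, if_neg hd]
      simp

-- A's whole loop from the empty state, on blank-free lines, as B's span decomposition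
theorem pvGoA_closed (ls : List String) (hne : ∀ l ∈ ls, l ≠ "") :
    pvGoA ls [] []
      = (if (pvTakeRun ls).1 ≠ [] then [pvJoinStrip (pvTakeRun ls).1] else [])
        ++ pvSegLoop (pvTakeRun ls).2 [] := by
  cases ls with
  | nil => simp [pvGoA, pvTakeRun, pvSegLoop]
  | cons l ls =>
    have h0 : ¬ l = "" := hne l (by simp)
    have hne' : ∀ x ∈ ls, x ≠ "" := fun x hx => hne x (by simp [hx])
    by_cases hd : PySem.Str.startswith l "- " = true
    · simp only [pvGoA, if_neg h0, if_pos hd, if_neg (by simp : ¬ ([] : List String) ≠ [])]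
      rw [pvGoA_open ls hne' _ (by simp)]
      rw [pvTakeRun, if_pos hd]
      rw [pvSegLoop]
      conv_rhs => rw [pvSegLoop_acc]
      simp
    · simp only [pvGoA, if_neg h0, if_neg hd, if_neg (by simp : ¬ ([] : List String) ≠ [])]
      rw [pvGoA_open ls hne' _ (by simp)]
      rw [pvTakeRun, if_neg hd]
      simp

-- if the non-dash prefix is empty, _take_run returns the whole list
theorem pvTakeRun_fst_nil {ls : List String} (h : (pvTakeRun ls).1 = []) :
    (pvTakeRun ls).2 = ls := by
  cases ls with
  | nil => rfl
  | cons l ls =>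
    by_cases hd : PySem.Str.startswith l "- " = true
    · rw [pvTakeRun, if_pos hd]
    · exfalso
      rw [pvTakeRun, if_neg hd] at h
      simp at h

-- the two functions agree on any blank-free line list
theorem main_core (F : List String) (hne : ∀ l ∈ F, l ≠ "") (t : String) :
    (if pvGoA F [] [] = [] then [t] else pvGoA F [] [])
      = if F = [] then [t]
        else pvSegLoop (pvTakeRun F).2
               (if (pvTakeRun F).1 ≠ [] then [pvJoinStrip (pvTakeRun F).1] else []) := by
  rw [pvGoA_closed F hne]
  by_cases hFnil : F = []
  · rw [if_pos hFnil]; subst hFnil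
    simp [pvTakeRun, pvSegLoop]
  · rw [if_neg hFnil]
    conv_rhs => rw [pvSegLoop_acc]
    by_cases hlead : (pvTakeRun F).1 = []
    · have h2 := pvTakeRun_fst_nil hlead
      rw [if_neg (not_not_intro hlead)]
      simp only [List.nil_append]
      cases hc : (pvTakeRun F).2 with
      | nil => exact absurd (by rw [← h2, hc]) hFnil
      | cons r rs =>
        have hnn : pvSegLoop (r :: rs) [] ≠ [] := by
          rw [pvSegLoop]
          conv_lhs => rw [pvSegLoop_acc]
          simp
        rw [if_neg hnn]
    · rw [if_pos hlead]
      simp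

-- ===== VERDICT (by name: the statement is the Claim_ definition above) =====
theorem parse_list_items_py_spec : Claim_equal_parse_list_items_py := by
  intro text _
  unfold Spec_parse_list_items_py parse_list_items_py parse_list_items_py_alt
  simp only [pv_lines_eq]
  rw [pvGoA_filter]
  exact main_core _ (fun l hl => by simpa using List.of_mem_filter hl) text
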